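-- pv_equiv track=rewrite | github.com/Tuxt/AutoScore | 01_preproceso/3-fix_decorators.py | extract_note
-- ===== SOURCE A (Python) =====
-- NOTE_PREFIX = '=_^'
--
-- NOTE_BODY = 'ABCDEFGabcdefgz'
--
-- NOTE_SUFFIX = ",'"
--
-- def extract_note(word):
--     note = ''
--     mul = ''
--     more = ''
--
--     # Get note
--     if word[0:1] in NOTE_PREFIX:
--         note += word[0:1]
--         word = word[1:]
--     if word[0:1] in NOTE_BODY:
--         note += word[0:1]
--         word = word[1:]
--     if word[0:1] in NOTE_SUFFIX:
--         note += word[0:1]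
--         word = word[1:]
--
--     # Get multiplier
--     while word[0:1] == '/' or word[0:1].isdecimal():
--         mul += word[0:1]
--         word = word[1:]
--     more = word
--     return note,mul,more
-- ===== SOURCE B (Python) =====
-- NOTE_PREFIX = '=_^'
--
-- NOTE_BODY = 'ABCDEFGabcdefgz'
--
-- NOTE_SUFFIX = ",'"
--
-- MUL_CHARS = '/0123456789'
--
-- def extract_note(word):
--     # Advance one index over the three optional note character classes,
--     # then strip the multiplier run off the rest; slice once at the end.
--     i = 0
--     for cls in (NOTE_PREFIX, NOTE_BODY, NOTE_SUFFIX):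
--         if i < len(word) and word[i] in cls:
--             i += 1
--     rest = word[i:]
--     more = rest.lstrip(MUL_CHARS)
--     mul = rest[:len(rest) - len(more)]
--     return word[:i], mul, more
-- ===== Notes on version B (the rewrite author's own statement) =====
-- stated objective: simpler
-- what changed: A consumes the string by repeated word[0:1] tests, slice reassignment and string concatenation (three if-blocks plus a while loop); B advances a single cursor over the three note classes, strips the multiplier run with lstrip, and slices the word once at the end.
import Mathlib
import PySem

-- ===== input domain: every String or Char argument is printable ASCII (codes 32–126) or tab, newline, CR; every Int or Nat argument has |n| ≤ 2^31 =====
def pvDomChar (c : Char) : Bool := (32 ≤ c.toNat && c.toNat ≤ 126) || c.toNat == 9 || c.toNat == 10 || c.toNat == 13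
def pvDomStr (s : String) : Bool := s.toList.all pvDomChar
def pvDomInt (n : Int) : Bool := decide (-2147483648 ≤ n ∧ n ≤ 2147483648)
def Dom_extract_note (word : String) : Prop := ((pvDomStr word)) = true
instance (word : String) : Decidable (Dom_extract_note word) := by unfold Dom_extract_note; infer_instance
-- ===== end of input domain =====

-- B replaces A's consume-and-concatenate slicing (three optional-char ifs plus a while loop
-- re-slicing the string each step) by index arithmetic: advance one cursor over the three note
-- classes, strip the multiplier run, slice once at the end (objective: simpler).


-- ===== PORT A =====
-- one 'if word[0:1] in CLS: note += word[0:1]; word = word[1:]' block of A (used three times,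
-- with NOTE_PREFIX, NOTE_BODY, NOTE_SUFFIX)
def extract_note_step (cls : List Char) (note : List Char) (w : List Char) : List Char × List Char :=
  if PySem.Chars.isIn (PySem.Chars.slice w (some 0) (some 1)) cls then
    (note ++ PySem.Chars.slice w (some 0) (some 1), PySem.Chars.slice w (some 1) none)
  else (note, w)

-- the 'while word[0:1] == '/' or word[0:1].isdecimal()' loop (on the ASCII domain isdecimal
-- coincides with PySem's isdigit, which is exactly the '0'..'9' range test)
def extract_note_loop (mul w : List Char) : List Char × List Char :=
  if h : PySem.Chars.slice w (some 0) (some 1) = ['/'] ∨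
         PySem.Chars.strIsdigit (PySem.Chars.slice w (some 0) (some 1)) = true then
    extract_note_loop (mul ++ PySem.Chars.slice w (some 0) (some 1))
                      (PySem.Chars.slice w (some 1) none)
  else (mul, w)
termination_by w.length
decreasing_by
  cases w with
  | nil => simp [PySem.Chars.slice_eq_listSlice, PySem.List.slice, PySem.Chars.strIsdigit] at h
  | cons c t =>
      simp [PySem.Chars.slice_eq_listSlice, PySem.List.slice_from_one]

def extract_note (word : String) : String × String × String :=
  let p := extract_note_step ("=_^".toList) [] word.toList
  let p := extract_note_step ("ABCDEFGabcdefgz".toList) p.1 p.2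
  let p := extract_note_step (",'".toList) p.1 p.2
  let q := extract_note_loop [] p.2
  (String.mk p.1, String.mk q.1, String.mk q.2)

-- ===== PORT B =====
def extract_note_alt (word : String) : String × String × String :=
  let cs := word.toList
  -- for cls in (NOTE_PREFIX, NOTE_BODY, NOTE_SUFFIX): if i < len(word) and word[i] in cls: i += 1
  let i := [("=_^".toList), ("ABCDEFGabcdefgz".toList), (",'".toList)].foldl
      (fun i cls => if i < cs.length ∧ cs.getD i ' ' ∈ cls then i + 1 else i) 0
  let rest := cs.drop i
  -- rest.lstrip('/0123456789'): hand port — drop leading chars belonging to the char set (exact)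
  let more := rest.dropWhile (fun c => c ∈ ("/0123456789".toList))
  let mul := rest.take (rest.length - more.length)
  (String.mk (cs.take i), String.mk mul, String.mk more)

-- ===== PRECONDITION & SPEC =====
def Spec_extract_note (word : String) (out : String × String × String) : Prop := out = extract_note_alt word
instance (word : String) (out : String × String × String) : Decidable (Spec_extract_note word out) := by unfold Spec_extract_note; infer_instance

-- ===== CLAIM (what is proved, stated in full; the proofs are below) =====
def Claim_equal_extract_note : Prop := ∀ (word : String), Dom_extract_note word → Spec_extract_note word (extract_note word)

-- ===== LEMMAS AND PROOFS =====
theorem slice01 (w : List Char) : PySem.Chars.slice w (some 0) (some 1) = w.take 1 := by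
  simp [PySem.Chars.slice_eq_listSlice, PySem.List.slice_toNat w (a := 0) (b := 1) (by omega) (by omega)]

theorem slice1 (w : List Char) : PySem.Chars.slice w (some 1) none = w.tail := by
  simp [PySem.Chars.slice_eq_listSlice, PySem.List.slice_from_one]

theorem isIn_singleton (c : Char) (l : List Char) : PySem.Chars.isIn [c] l = true ↔ c ∈ l := by
  rw [PySem.Chars.isIn_iff_infix]
  constructor
  · intro h; exact h.sublist.mem (by simp)
  · intro h
    obtain ⟨s, t, rfl⟩ := List.append_of_mem h
    exact ⟨s, t, by simp⟩

theorem stepEq (cs : List Char) (i : Nat) (cls : List Char) :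
    extract_note_step cls (cs.take i) (cs.drop i)
    = (cs.take (if i < cs.length ∧ cs.getD i ' ' ∈ cls then i + 1 else i),
       cs.drop (if i < cs.length ∧ cs.getD i ' ' ∈ cls then i + 1 else i)) := by
  unfold extract_note_step
  rw [slice01, slice1]
  by_cases hi : i < cs.length
  · have hd : cs.drop i = cs[i] :: cs.drop (i + 1) := List.drop_eq_getElem_cons hi
    have hg : cs.getD i ' ' = cs[i] := List.getD_eq_getElem cs ' ' hi
    rw [hd, hg, show List.take 1 (cs[i] :: cs.drop (i+1)) = [cs[i]] from rfl,
        show List.tail (cs[i] :: cs.drop (i+1)) = cs.drop (i+1) from rfl]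
    by_cases hm : cs[i] ∈ cls
    · rw [if_pos ((isIn_singleton _ _).mpr hm), if_pos ⟨hi, hm⟩]
      rw [List.take_add_one, List.getElem?_eq_getElem hi]
      rfl
    · rw [if_neg (fun h => hm ((isIn_singleton _ _).mp h)), if_neg (fun h => hm h.2), hd]
  · have hnil : cs.drop i = [] := List.drop_eq_nil_of_le (by omega)
    have hb : ¬ (i < cs.length ∧ cs.getD i ' ' ∈ cls) := fun h => hi h.1
    rw [hnil, if_neg hb, show List.take 1 ([]:List Char) = [] from rfl,
        show List.tail ([]:List Char) = [] from rfl,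
        if_pos (PySem.Chars.isIn_nil cls)]
    simp [hnil]

theorem stepEq0 (cs : List Char) (cls : List Char) :
    extract_note_step cls [] cs
    = (cs.take (if 0 < cs.length ∧ cs.getD 0 ' ' ∈ cls then 0 + 1 else 0),
       cs.drop (if 0 < cs.length ∧ cs.getD 0 ' ' ∈ cls then 0 + 1 else 0)) :=
  stepEq cs 0 cls

theorem charOfToNat (c d : Char) (h : c.toNat = d.toNat) : c = d :=
  Char.ext (UInt32.toNat_inj.mp h)

theorem mem_digits (c : Char) (h1 : '0' ≤ c) (h2 : c ≤ '9') :
    c ∈ ['0','1','2','3','4','5','6','7','8','9'] := by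
  have l1 : 48 ≤ c.toNat := Char.le_def.mp h1
  have l2 : c.toNat ≤ 57 := Char.le_def.mp h2
  have hd : c.toNat = 48 ∨ c.toNat = 49 ∨ c.toNat = 50 ∨ c.toNat = 51 ∨ c.toNat = 52 ∨
      c.toNat = 53 ∨ c.toNat = 54 ∨ c.toNat = 55 ∨ c.toNat = 56 ∨ c.toNat = 57 := by omega
  rcases hd with h|h|h|h|h|h|h|h|h|h <;>
    first
      | (rw [charOfToNat c '0' (by rw [h]; rfl)]; decide)
      | (rw [charOfToNat c '1' (by rw [h]; rfl)]; decide)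
      | (rw [charOfToNat c '2' (by rw [h]; rfl)]; decide)
      | (rw [charOfToNat c '3' (by rw [h]; rfl)]; decide)
      | (rw [charOfToNat c '4' (by rw [h]; rfl)]; decide)
      | (rw [charOfToNat c '5' (by rw [h]; rfl)]; decide)
      | (rw [charOfToNat c '6' (by rw [h]; rfl)]; decide)
      | (rw [charOfToNat c '7' (by rw [h]; rfl)]; decide)
      | (rw [charOfToNat c '8' (by rw [h]; rfl)]; decide)
      | (rw [charOfToNat c '9' (by rw [h]; rfl)]; decide)

theorem charCond (c : Char) :
    (c = '/' ∨ PySem.Chars.strIsdigit [c] = true) ↔ c ∈ ("/0123456789".toList) := by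
  have hl : ("/0123456789".toList) = '/' :: ['0','1','2','3','4','5','6','7','8','9'] := rfl
  rw [hl]
  constructor
  · rintro (rfl | h)
    · simp
    · simp only [PySem.Chars.strIsdigit, PySem.Chars.isdigit, List.all_cons, List.all_nil,
        Bool.and_true, List.isEmpty_cons, Bool.not_false, Bool.true_and,
        Bool.and_eq_true, decide_eq_true_eq] at h
      exact List.mem_cons_of_mem _ (mem_digits c h.1 h.2)
  · intro h
    rcases List.mem_cons.mp h with rfl | h
    · exact Or.inl rfl
    · right
      fin_cases h <;> decide

theorem loopEq (w mul : List Char) :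
    extract_note_loop mul w
      = (mul ++ w.takeWhile (fun c => c ∈ ("/0123456789".toList)),
         w.dropWhile (fun c => c ∈ ("/0123456789".toList))) := by
  induction w generalizing mul with
  | nil =>
      rw [extract_note_loop]
      simp [PySem.Chars.slice_eq_listSlice, PySem.List.slice, PySem.Chars.strIsdigit]
  | cons c t ih =>
      rw [extract_note_loop, slice01, slice1,
          show List.take 1 (c :: t) = [c] from rfl, show List.tail (c :: t) = t from rfl]
      by_cases hp : c ∈ ("/0123456789".toList)
      · have hc : [c] = ['/'] ∨ PySem.Chars.strIsdigit [c] = true := by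
          rcases (charCond c).mpr hp with rfl | h
          · exact Or.inl rfl
          · exact Or.inr h
        rw [dif_pos hc, ih,
            List.takeWhile_cons_of_pos (by simpa using hp),
            List.dropWhile_cons_of_pos (by simpa using hp)]
        simp [List.append_assoc]
      · have hc : ¬ ([c] = ['/'] ∨ PySem.Chars.strIsdigit [c] = true) := by
          intro h
          apply hp
          apply (charCond c).mp
          rcases h with h | h
          · exact Or.inl (by injection h)
          · exact Or.inr h
        rw [dif_neg hc,
            List.takeWhile_cons_of_neg (by simpa using hp),
            List.dropWhile_cons_of_neg (by simpa using hp)]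
        simp

theorem take_sub_dropWhile (w : List Char) (p : Char → Bool) :
    w.take (w.length - (w.dropWhile p).length) = w.takeWhile p := by
  have hlen : w.length - (w.dropWhile p).length = (w.takeWhile p).length := by
    have h := congrArg List.length (List.takeWhile_append_dropWhile (p := p) (l := w))
    rw [List.length_append] at h
    omega
  rw [hlen]
  exact ((List.prefix_iff_eq_take).mp (List.takeWhile_prefix p)).symm

-- ===== VERDICT (by name: the statement is the Claim_ definition above) =====
theorem extract_note_spec : Claim_equal_extract_note := by
  intro word _
  show extract_note word = extract_note_alt word
  unfold extract_note extract_note_alt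
  simp only [List.foldl]
  rw [stepEq0]
  dsimp only
  rw [stepEq]
  dsimp only
  rw [stepEq]
  dsimp only
  rw [loopEq]
  dsimp only
  rw [take_sub_dropWhile]
  simp only [List.nil_append]
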